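-- pv_equiv track=rewrite | github.com/MNafekh/Daily9er | marketAPI.py | findSell
-- ===== SOURCE A (Python) =====
-- def findSell(last13) -> int:
--     seq = 0
--     i = 0
--     while i < len(last13) - 4:
--         curr = last13[i]
--         fth = last13[i + 4]
--         if curr > fth:
--             seq += 1
--         else:
--             seq = 0
--         i += 1
--     return seq
-- ===== SOURCE B (Python) =====
-- def findSell(last13) -> int:
--     seq = 0
--     for i in range(len(last13) - 5, -1, -1):
--         if last13[i] > last13[i + 4]:
--             seq += 1
--         else:
--             break
--     return seq
-- ===== Notes on version B (the rewrite author's own statement) =====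
-- stated objective: faster
-- what changed: Replaces the forward scan with reset logic by a reverse short-circuiting scan: iterate i from len-5 down to 0, counting while last13[i] > last13[i+4] and breaking on the first failure, so the trailing-run length is read off directly with no reset pass over the whole list.
import Mathlib
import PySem

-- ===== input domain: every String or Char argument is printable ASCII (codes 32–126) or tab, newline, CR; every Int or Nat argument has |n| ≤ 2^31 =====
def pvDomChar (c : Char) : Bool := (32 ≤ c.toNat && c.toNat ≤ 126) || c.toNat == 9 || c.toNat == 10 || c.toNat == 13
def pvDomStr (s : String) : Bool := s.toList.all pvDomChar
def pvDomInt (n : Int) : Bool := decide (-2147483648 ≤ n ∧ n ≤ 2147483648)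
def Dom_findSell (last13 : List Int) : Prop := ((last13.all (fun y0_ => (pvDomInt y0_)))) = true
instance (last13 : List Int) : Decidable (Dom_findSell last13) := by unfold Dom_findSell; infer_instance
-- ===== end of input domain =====

-- B: reverse short-circuiting scan instead of A's forward reset-scan; same return value, alternative decomposition.

-- ===== PORT A =====
-- while loop over i = 0 .. len-5 with reset accumulator; indices are always in range,
-- so pyGetD with default 0 is exact here.
def findSell (last13 : List Int) : Int :=
  (PySem.List.pyRange 0 ((last13.length : Int) - 4) 1).foldl
    (fun seq i =>
      let curr := PySem.List.pyGetD last13 i 0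
      let fth := PySem.List.pyGetD last13 (i + 4) 0
      if curr > fth then seq + 1 else 0) 0

-- ===== PORT B =====
-- for i in range(len-5, -1, -1): count while last13[i] > last13[i+4], break on first failure.
def findSellAltGo (last13 : List Int) (seq : Int) : List Int → Int
  | [] => seq
  | i :: rest =>
      if PySem.List.pyGetD last13 i 0 > PySem.List.pyGetD last13 (i + 4) 0 then
        findSellAltGo last13 (seq + 1) rest
      else seq

def findSell_alt (last13 : List Int) : Int :=
  findSellAltGo last13 0 (PySem.List.pyRange ((last13.length : Int) - 5) (-1) (-1))

-- ===== PRECONDITION & SPEC =====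
def Spec_findSell (last13 : List Int) (out : Int) : Prop := out = findSell_alt last13
instance (last13 : List Int) (out : Int) : Decidable (Spec_findSell last13 out) := by unfold Spec_findSell; infer_instance

-- ===== CLAIM (what is proved, stated in full; the proofs are below) =====
def Claim_equal_findSell : Prop := ∀ (last13 : List Int), Dom_findSell last13 → Spec_findSell last13 (findSell last13)

-- ===== LEMMAS AND PROOFS =====

-- reset-fold over l = length of the trailing run of trues = takeWhile on the reverse
theorem resetFold_eq_takeWhile_reverse (c : Int → Prop) [DecidablePred c] (l : List Int) :
    l.foldl (fun seq i => if c i then seq + 1 else 0) 0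
      = ((l.reverse.takeWhile (fun i => decide (c i))).length : Int) := by
  induction l using List.reverseRecOn with
  | nil => simp
  | append_singleton l i ih =>
      rw [List.foldl_append]
      simp only [List.foldl_cons, List.foldl_nil, List.reverse_append, List.reverse_singleton,
        List.singleton_append, List.takeWhile_cons]
      by_cases h : c i
      · simp [h, ih]
      · simp [h]

-- B's break-loop counts the leading run of trues, offset by seq
theorem findSellAltGo_eq (last13 : List Int) (l : List Int) (seq : Int) :
    findSellAltGo last13 seq l
      = seq + ((l.takeWhile
          (fun i => PySem.List.pyGetD last13 i 0 > PySem.List.pyGetD last13 (i + 4) 0)).length : Int) := by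
  induction l generalizing seq with
  | nil => simp [findSellAltGo]
  | cons i rest ih =>
      rw [findSellAltGo, List.takeWhile_cons]
      by_cases h : PySem.List.pyGetD last13 i 0 > PySem.List.pyGetD last13 (i + 4) 0
      · rw [if_pos h, ih]; simp [h]; push_cast; ring
      · simp [h]

-- ===== VERDICT (by name: the statement is the Claim_ definition above) =====
theorem findSell_spec : Claim_equal_findSell := by
  intro last13 _
  unfold Spec_findSell findSell findSell_alt
  have hrev : PySem.List.pyRange ((last13.length : Int) - 5) (-1) (-1)
      = (PySem.List.pyRange 0 ((last13.length : Int) - 4) 1).reverse := by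
    rw [PySem.List.pyRange_neg_one_eq_reverse]
    norm_num
    congr 1
    ring
  rw [hrev, findSellAltGo_eq, zero_add]
  exact resetFold_eq_takeWhile_reverse
    (fun i => PySem.List.pyGetD last13 i 0 > PySem.List.pyGetD last13 (i + 4) 0) _
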